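-- pv_equiv track=rewrite | github.com/nazar262/DODMuniVR | solutions/piastrelle10/solution.py | profile_dp_2row
-- ===== SOURCE A (Python) =====
-- from functools import lru_cache
--
-- BASE = 10**9 + 7
--
-- def profile_dp_2row(n, tiles):
--     """
--     tiles: list of (h, w) where h <= 2, w in {1, 2}
--     Tile 2 x n grid. State = bitmask of which rows are pre-occupied in current col.
--     """
--     full = 3  # both rows
--
--     @lru_cache(maxsize=None)
--     def fill(state, nxt, row):
--         if row == 2:
--             return [(nxt, 1)] if state == full else []
--         if state & (1 << row):
--             return fill(state, nxt, row + 1)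
--         results = []
--         for (h, w) in tiles:
--             if row + h > 2: continue
--             rows_mask = sum(1 << (row + dr) for dr in range(h))
--             if rows_mask & state: continue
--             if w == 2 and (rows_mask & nxt): continue
--             new_nxt = nxt | rows_mask if w == 2 else nxt
--             results.extend(fill(state | rows_mask, new_nxt, row + 1))
--         return results
--
--     # Build transition table
--     trans = {}
--     for pre in range(4):
--         trans[pre] = {}
--         for (nxt, _) in fill(pre, 0, 0):
--             trans[pre][nxt] = trans[pre].get(nxt, 0) + 1
--     fill.cache_clear()
--
--     dp = [0] * 4
--     dp[0] = 1
--     for _ in range(n):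
--         ndp = [0] * 4
--         for pre in range(4):
--             if not dp[pre]: continue
--             for nxt, cnt in trans[pre].items():
--                 ndp[nxt] = (ndp[nxt] + dp[pre] * cnt) % BASE
--         dp = ndp
--     return dp[0]
-- ===== SOURCE B (Python) =====
-- BASE = 10**9 + 7
--
-- def profile_dp_2row(n, tiles):
--     """
--     tiles: list of (h, w) where h <= 2, w in {1, 2}
--     Tile 2 x n grid, answer mod BASE, via binary exponentiation of the
--     4x4 column-transition matrix built in closed form from tile counts.
--     """
--     # one pass: count the four tile shapes that can ever be placed
--     t1 = t1h = t2v = t2w = 0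
--     for h, w in tiles:
--         if h == 1:
--             if w == 2:
--                 t1h += 1
--             else:
--                 t1 += 1
--         elif h == 2:
--             if w == 2:
--                 t2w += 1
--             else:
--                 t2v += 1
--     # M[pre][nxt]: ways to complete a column pre-occupied by mask `pre`,
--     # leaving mask `nxt` sticking into the next column
--     M = [[(t1 * t1 + t2v) % BASE, (t1h * t1) % BASE, (t1 * t1h) % BASE, (t1h * t1h + t2w) % BASE],
--          [t1 % BASE, 0, t1h % BASE, 0],
--          [t1 % BASE, t1h % BASE, 0, 0],
--          [1, 0, 0, 0]]
--
--     def mul(X, Y):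
--         return [[sum(X[i][k] * Y[k][j] for k in range(4)) % BASE for j in range(4)]
--                 for i in range(4)]
--
--     R = [[1 if i == j else 0 for j in range(4)] for i in range(4)]
--     e = n if n > 0 else 0
--     while e > 0:
--         if e & 1:
--             R = mul(R, M)
--         M = mul(M, M)
--         e >>= 1
--     return R[0][0]
-- ===== Notes on version B (the rewrite author's own statement) =====
-- stated objective: faster
-- what changed: B replaces A's recursive profile enumeration plus n-step linear DP by a closed-form 4x4 transition matrix (built from one counting pass over tiles) raised to the n-th power by binary exponentiation mod 10^9+7.
import Mathlib
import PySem

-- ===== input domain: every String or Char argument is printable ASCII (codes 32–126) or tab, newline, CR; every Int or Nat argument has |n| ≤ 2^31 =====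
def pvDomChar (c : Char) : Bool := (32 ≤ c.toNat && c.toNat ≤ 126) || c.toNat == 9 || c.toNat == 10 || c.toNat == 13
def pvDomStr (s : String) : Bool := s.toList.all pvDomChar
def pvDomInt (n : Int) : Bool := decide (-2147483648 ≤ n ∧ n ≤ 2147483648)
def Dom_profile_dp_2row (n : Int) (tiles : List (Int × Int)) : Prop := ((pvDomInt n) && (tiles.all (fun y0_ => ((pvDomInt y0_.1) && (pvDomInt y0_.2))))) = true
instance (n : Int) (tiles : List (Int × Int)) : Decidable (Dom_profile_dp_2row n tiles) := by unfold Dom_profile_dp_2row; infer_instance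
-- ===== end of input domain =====

-- B replaces A's recursive profile enumeration + n-step linear DP by a closed-form 4x4
-- transition matrix (one counting pass over tiles) raised to the n-th power by binary
-- exponentiation mod 10^9+7 (objective: faster).

-- ===== PORT A =====
def pvBase : Int := 10 ^ 9 + 7

-- ===== PORT A =====
-- fill(state, nxt, row): recursion on 2 - row; Python tests 'row == 2' and only ever
-- calls rows 0,1,2, so the '2 ≤ row' guard is the same test made total.
-- '1 << k' is ported as '(1 : Int) <<< k.toNat'; every shift amount here is ≥ 0, where toNat is exact.
def fillA (tiles : List (Int × Int)) (state nxt : Int) (row : Nat) : List (Int × Int) :=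
  if _hge : 2 ≤ row then
    (if state = 3 then [(nxt, 1)] else [])
  else if PySem.Int.band state ((1 : Int) <<< row) ≠ 0 then
    fillA tiles state nxt (row + 1)
  else
    tiles.foldl (fun results hw =>
      if (row : Int) + hw.1 > 2 then results
      else
        let rows_mask : Int :=
          ((PySem.List.pyRange 0 hw.1 1).map (fun dr => (1 : Int) <<< ((row : Int) + dr).toNat)).sum
        if PySem.Int.band rows_mask state ≠ 0 then results
        else if hw.2 = 2 ∧ PySem.Int.band rows_mask nxt ≠ 0 then results
        else
          results ++ fillA tiles (PySem.Int.bor state rows_mask)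
            (if hw.2 = 2 then PySem.Int.bor nxt rows_mask else nxt) (row + 1)) []
  termination_by 2 - row
  decreasing_by all_goals omega

-- trans[pre] = {}; for (nxt, _) in fill(pre, 0, 0): trans[pre][nxt] = trans[pre].get(nxt, 0) + 1
def transA (tiles : List (Int × Int)) : PySem.Dict Int (PySem.Dict Int Int) :=
  (PySem.List.pyRange 0 4 1).foldl (fun trans pre =>
    trans.insert pre ((fillA tiles pre 0 0).foldl
      (fun d p => d.insert p.1 (d.getD p.1 0 + 1)) PySem.Dict.empty)) PySem.Dict.empty

-- trans always has keys 0..3 and every nxt index lies in [0,4), so getD / pySetD / pyGetD are exact.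
def profile_dp_2row (n : Int) (tiles : List (Int × Int)) : Int :=
  let trans := transA tiles
  let dp0 : List Int := (List.replicate 4 (0 : Int)).set 0 1
  let dp := (PySem.List.pyRange 0 n 1).foldl (fun dp _ =>
    (PySem.List.pyRange 0 4 1).foldl (fun ndp pre =>
      if PySem.List.pyGetD dp pre 0 = 0 then ndp
      else ((trans.getD pre PySem.Dict.empty).items).foldl
        (fun ndp kv =>
          PySem.List.pySetD ndp kv.1
            (PySem.Int.mod (PySem.List.pyGetD ndp kv.1 0 + PySem.List.pyGetD dp pre 0 * kv.2) pvBase))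
        ndp) (List.replicate 4 (0 : Int))) dp0
  PySem.List.pyGetD dp 0 0

-- ===== PORT B =====
def pvMatMulB (X Y : List (List Int)) : List (List Int) :=
  (PySem.List.pyRange 0 4 1).map (fun i =>
    (PySem.List.pyRange 0 4 1).map (fun j =>
      PySem.Int.mod
        (((PySem.List.pyRange 0 4 1).map (fun k =>
            PySem.List.pyGetD (PySem.List.pyGetD X i []) k 0 *
            PySem.List.pyGetD (PySem.List.pyGetD Y k []) j 0)).sum)
        pvBase))

-- while e > 0: if e & 1: R = R*M; M = M*M; e >>= 1   (e : Nat since e = max(n,0) ≥ 0)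
def pvPowLoop (R M : List (List Int)) (e : Nat) : List (List Int) :=
  if _h : e = 0 then R
  else pvPowLoop (if e % 2 = 1 then pvMatMulB R M else R) (pvMatMulB M M) (e / 2)
  termination_by e
  decreasing_by exact Nat.div_lt_self (Nat.pos_of_ne_zero _h) (by norm_num)

def profile_dp_2row_alt (n : Int) (tiles : List (Int × Int)) : Int :=
  let c := tiles.foldl (fun (c : Int × Int × Int × Int) hw =>
    if hw.1 = 1 then
      (if hw.2 = 2 then (c.1, c.2.1 + 1, c.2.2.1, c.2.2.2) else (c.1 + 1, c.2.1, c.2.2.1, c.2.2.2))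
    else if hw.1 = 2 then
      (if hw.2 = 2 then (c.1, c.2.1, c.2.2.1, c.2.2.2 + 1) else (c.1, c.2.1, c.2.2.1 + 1, c.2.2.2))
    else c) (0, 0, 0, 0)
  let t1 := c.1; let t1h := c.2.1; let t2v := c.2.2.1; let t2w := c.2.2.2
  let M : List (List Int) :=
    [[PySem.Int.mod (t1 * t1 + t2v) pvBase, PySem.Int.mod (t1h * t1) pvBase,
      PySem.Int.mod (t1 * t1h) pvBase, PySem.Int.mod (t1h * t1h + t2w) pvBase],
     [PySem.Int.mod t1 pvBase, 0, PySem.Int.mod t1h pvBase, 0],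
     [PySem.Int.mod t1 pvBase, PySem.Int.mod t1h pvBase, 0, 0],
     [1, 0, 0, 0]]
  let R : List (List Int) :=
    (PySem.List.pyRange 0 4 1).map (fun i =>
      (PySem.List.pyRange 0 4 1).map (fun j => if i = j then (1 : Int) else 0))
  -- e = n if n > 0 else 0 (≥ 0, so toNat is exact)
  let res := pvPowLoop R M (if n > 0 then n else 0).toNat
  PySem.List.pyGetD (PySem.List.pyGetD res 0 []) 0 0

-- ===== PRECONDITION & SPEC =====
def Spec_profile_dp_2row (n : Int) (tiles : List (Int × Int)) (out : Int) : Prop := out = profile_dp_2row_alt n tiles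
instance (n : Int) (tiles : List (Int × Int)) (out : Int) : Decidable (Spec_profile_dp_2row n tiles out) := by unfold Spec_profile_dp_2row; infer_instance

-- ===== CLAIM (what is proved, stated in full; the proofs are below) =====
def Claim_equal_profile_dp_2row : Prop := ∀ (n : Int) (tiles : List (Int × Int)), Dom_profile_dp_2row n tiles → Spec_profile_dp_2row n tiles (profile_dp_2row n tiles)

-- ===== LEMMAS AND PROOFS =====
def gA (tiles : List (Int × Int)) (state nxt : Int) (row : Nat) (hw : Int × Int) : List (Int × Int) :=
  if (row : Int) + hw.1 > 2 then []
  else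
    let rows_mask : Int :=
      ((PySem.List.pyRange 0 hw.1 1).map (fun dr => (1 : Int) <<< ((row : Int) + dr).toNat)).sum
    if PySem.Int.band rows_mask state ≠ 0 then []
    else if hw.2 = 2 ∧ PySem.Int.band rows_mask nxt ≠ 0 then []
    else fillA tiles (PySem.Int.bor state rows_mask)
      (if hw.2 = 2 then PySem.Int.bor nxt rows_mask else nxt) (row + 1)

theorem fill_two (tiles : List (Int × Int)) (state nxt : Int) :
    fillA tiles state nxt 2 = if state = 3 then [(nxt, 1)] else [] := by
  rw [fillA]; simp

theorem fill_flatMap (tiles : List (Int × Int)) (state nxt : Int) (row : Nat)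
    (h2 : ¬ 2 ≤ row) (hb : PySem.Int.band state ((1 : Int) <<< row) = 0) :
    fillA tiles state nxt row = tiles.flatMap (gA tiles state nxt row) := by
  rw [fillA]
  simp only [h2, hb, ne_eq, not_true_eq_false, if_false, dif_neg, not_false_iff]
  rw [show List.flatMap (gA tiles state nxt row) tiles
        = List.foldl (fun acc hw => acc ++ gA tiles state nxt row hw) [] tiles from by
      rw [PySem.List.foldl_append_eq_flatMap]; simp]
  refine PySem.List.foldl_congr_mem tiles _ _ _ ?_
  intro acc hw _
  simp only [gA]
  split_ifs <;> simp_all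

theorem gA_one (tiles : List (Int × Int)) (nxt : Int) (hn : PySem.Int.band 2 nxt = 0) (hw : Int × Int) :
    gA tiles 1 nxt 1 hw
      = if hw.1 = 1 then [(if hw.2 = 2 then PySem.Int.bor nxt 2 else nxt, 1)] else [] := by
  obtain ⟨h, w⟩ := hw
  simp only [gA]
  by_cases h1 : h = 1
  · subst h1
    have hm : ((PySem.List.pyRange 0 (1:Int) 1).map (fun dr => (1:Int) <<< (((1:Nat):Int) + dr).toNat)).sum = 2 := by decide
    simp only [hm]
    norm_num [hn, fill_two, show PySem.Int.band 2 1 = 0 from by decide,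
      show PySem.Int.bor 1 2 = 3 from by decide]
  · by_cases hgt : (1:Int) + h > 2
    · rw [if_pos (by push_cast; omega)]
      simp [h1]
    · rw [if_neg (by push_cast; omega)]
      have hm : ((PySem.List.pyRange 0 h 1).map (fun dr => (1:Int) <<< (((1:Nat):Int) + dr).toNat)).sum = 0 := by
        rw [PySem.List.pyRange_one_eq_nil (by omega)]; simp
      simp only [hm]
      norm_num [fill_two, h1]

theorem fill_skip (tiles : List (Int × Int)) (state nxt : Int) (row : Nat)
    (h2 : ¬ 2 ≤ row) (hb : PySem.Int.band state ((1 : Int) <<< row) ≠ 0) :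
    fillA tiles state nxt row = fillA tiles state nxt (row + 1) := by
  rw [fillA]; simp [h2, hb]

theorem fill_pre3 (tiles : List (Int × Int)) : fillA tiles 3 0 0 = [(0, 1)] := by
  rw [fill_skip _ _ _ _ (by omega) (by decide), fill_skip _ _ _ _ (by omega) (by decide), fill_two]
  norm_num

theorem fill_one_zero (tiles : List (Int × Int)) : fillA tiles 0 0 1 = [] := by
  rw [fill_flatMap _ _ _ _ (by omega) (by decide)]
  rw [List.flatMap_eq_nil_iff]
  intro hw _
  obtain ⟨h, w⟩ := hw
  simp only [gA]
  by_cases h1 : h = 1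
  · subst h1
    have hm : ((PySem.List.pyRange 0 (1:Int) 1).map (fun dr => (1:Int) <<< (((1:Nat):Int) + dr).toNat)).sum = 2 := by decide
    simp only [hm]
    norm_num [fill_two, show PySem.Int.band 2 0 = 0 from by decide,
      show PySem.Int.bor 0 2 = 2 from by decide]
  · by_cases hgt : (1:Int) + h > 2
    · rw [if_pos (by push_cast; omega)]
    · rw [if_neg (by push_cast; omega)]
      have hm : ((PySem.List.pyRange 0 h 1).map (fun dr => (1:Int) <<< (((1:Nat):Int) + dr).toNat)).sum = 0 := by
        rw [PySem.List.pyRange_one_eq_nil (by omega)]; simp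
      simp only [hm]
      norm_num [fill_two]

theorem fill_pre1 (tiles : List (Int × Int)) :
    fillA tiles 1 0 0 = tiles.flatMap
      (fun hw => if hw.1 = 1 then [((if hw.2 = 2 then (2:Int) else 0), 1)] else []) := by
  rw [fill_skip _ _ _ _ (by omega) (by decide), fill_flatMap _ _ _ _ (by omega) (by decide)]
  refine List.flatMap_congr ?_
  intro x _
  simp only [Nat.reduceAdd, gA_one tiles 0 (by decide), show PySem.Int.bor 0 2 = 2 from by decide]

theorem fill_pre2 (tiles : List (Int × Int)) :
    fillA tiles 2 0 0 = tiles.flatMap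
      (fun hw => if hw.1 = 1 then [((if hw.2 = 2 then (1:Int) else 0), 1)] else []) := by
  rw [fill_flatMap _ _ _ _ (by omega) (by decide)]
  refine List.flatMap_congr ?_
  intro x _
  obtain ⟨h, w⟩ := x
  simp only [gA]
  by_cases h1 : h = 1
  · subst h1
    have hm : ((PySem.List.pyRange 0 (1:Int) 1).map (fun dr => (1:Int) <<< (((0:Nat):Int) + dr).toNat)).sum = 1 := by decide
    simp only [hm]
    norm_num [show PySem.Int.band 1 2 = 0 from by decide, show PySem.Int.band 1 0 = 0 from by decide,
      show PySem.Int.bor 2 1 = 3 from by decide, show PySem.Int.bor 0 1 = 1 from by decide,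
      (fun ν => fill_skip tiles 3 ν 1 (by omega) (by decide)), fill_two]
  · by_cases h2c : h = 2
    · subst h2c
      have hm : ((PySem.List.pyRange 0 (2:Int) 1).map (fun dr => (1:Int) <<< (((0:Nat):Int) + dr).toNat)).sum = 3 := by decide
      simp only [hm]
      norm_num [show PySem.Int.band 3 2 = 2 from by decide]
    · by_cases hgt : (0:Int) + h > 2
      · rw [if_pos (by push_cast; omega)]
        simp [h1, h2c]
      · rw [if_neg (by push_cast; omega)]
        have hm : ((PySem.List.pyRange 0 h 1).map (fun dr => (1:Int) <<< (((0:Nat):Int) + dr).toNat)).sum = 0 := by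
          rw [PySem.List.pyRange_one_eq_nil (by omega)]; simp
        simp only [hm]
        norm_num [h1, h2c, show PySem.Int.band 0 2 = 0 from by decide, show PySem.Int.band 0 0 = 0 from by decide,
          show PySem.Int.bor 2 0 = 2 from by decide,
          (fun ν => fill_skip tiles 2 ν 1 (by omega) (by decide)), fill_two]

def g0 (tiles : List (Int × Int)) (hw : Int × Int) : List (Int × Int) :=
  if hw.1 = 1 then
    tiles.flatMap (fun hw' => if hw'.1 = 1 then
      [((if hw'.2 = 2 then (if hw.2 = 2 then (3:Int) else 2) else (if hw.2 = 2 then 1 else 0)), 1)]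
      else [])
  else if hw.1 = 2 then [((if hw.2 = 2 then (3:Int) else 0), 1)] else []

theorem fill_pre0 (tiles : List (Int × Int)) :
    fillA tiles 0 0 0 = tiles.flatMap (g0 tiles) := by
  rw [fill_flatMap _ _ _ _ (by omega) (by decide)]
  refine List.flatMap_congr ?_
  intro x _
  obtain ⟨h, w⟩ := x
  simp only [gA, g0]
  by_cases h1 : h = 1
  · subst h1
    have hm : ((PySem.List.pyRange 0 (1:Int) 1).map (fun dr => (1:Int) <<< (((0:Nat):Int) + dr).toNat)).sum = 1 := by decide
    simp only [hm]
    norm_num [show PySem.Int.band 1 0 = 0 from by decide, show PySem.Int.bor 0 1 = 1 from by decide]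
    by_cases hw2 : w = 2
    · simp only [hw2, if_pos rfl, if_true]
      rw [fill_flatMap _ _ _ _ (by omega) (by decide)]
      refine List.flatMap_congr ?_
      intro y _
      simp only [gA_one tiles 1 (by decide), show PySem.Int.bor 1 2 = 3 from by decide]
    · simp only [hw2, if_neg hw2, if_false]
      rw [fill_flatMap _ _ _ _ (by omega) (by decide)]
      refine List.flatMap_congr ?_
      intro y _
      simp only [gA_one tiles 0 (by decide), show PySem.Int.bor 0 2 = 2 from by decide]
  · by_cases h2c : h = 2
    · subst h2c
      have hm : ((PySem.List.pyRange 0 (2:Int) 1).map (fun dr => (1:Int) <<< (((0:Nat):Int) + dr).toNat)).sum = 3 := by decide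
      simp only [hm]
      norm_num [h1, show PySem.Int.band 3 0 = 0 from by decide,
        show PySem.Int.bor 0 3 = 3 from by decide,
        (fun ν => fill_skip tiles 3 ν 1 (by omega) (by decide)), fill_two]
    · by_cases hgt : (0:Int) + h > 2
      · rw [if_pos (by push_cast; omega)]
        simp [h1, h2c]
      · rw [if_neg (by push_cast; omega)]
        have hm : ((PySem.List.pyRange 0 h 1).map (fun dr => (1:Int) <<< (((0:Nat):Int) + dr).toNat)).sum = 0 := by
          rw [PySem.List.pyRange_one_eq_nil (by omega)]; simp
        simp only [hm]
        norm_num [h1, h2c, show PySem.Int.band 0 0 = 0 from by decide,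
          show PySem.Int.bor 0 0 = 0 from by decide, fill_one_zero]

def nA (tiles : List (Int × Int)) : Nat := tiles.countP (fun hw => decide (hw.1 = 1 ∧ hw.2 ≠ 2))
def nB (tiles : List (Int × Int)) : Nat := tiles.countP (fun hw => decide (hw.1 = 1 ∧ hw.2 = 2))
def nC (tiles : List (Int × Int)) : Nat := tiles.countP (fun hw => decide (hw.1 = 2 ∧ hw.2 ≠ 2))
def nD (tiles : List (Int × Int)) : Nat := tiles.countP (fun hw => decide (hw.1 = 2 ∧ hw.2 = 2))

theorem pvCountFlatMap {α : Type} (l : List α) (g : α → List Int) (j : Int) :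
    (l.flatMap g).count j = (l.map (fun x => (g x).count j)).sum := by
  induction l with
  | nil => simp
  | cons x t ih => simp [List.count_append, ih]

theorem count_single_family (tiles : List (Int × Int)) (a b j : Int) :
    (((tiles.flatMap (fun hw => if hw.1 = 1 then [((if hw.2 = 2 then a else b), (1:Int))] else [])).map Prod.fst).count j)
      = (if a = j then nB tiles else 0) + (if b = j then nA tiles else 0) := by
  induction tiles with
  | nil => simp [nA, nB]
  | cons x t ih =>
    simp only [List.flatMap_cons, List.map_append, List.count_append, ih, nA, nB, List.countP_cons]
    split_ifs <;> simp_all [List.count_singleton, List.count_cons] <;> omega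

theorem sum_percount (tiles : List (Int × Int)) (K1 K2 K3 K4 : Nat) :
    (tiles.map (fun x => if x.1 = 1 then (if x.2 = 2 then K1 else K2)
        else if x.1 = 2 then (if x.2 = 2 then K3 else K4) else 0)).sum
      = K1 * nB tiles + K2 * nA tiles + K3 * nD tiles + K4 * nC tiles := by
  induction tiles with
  | nil => simp [nA, nB, nC, nD]
  | cons x t ih =>
    simp only [List.map_cons, List.sum_cons, ih, nA, nB, nC, nD, List.countP_cons]
    split_ifs <;> simp_all <;> ring

theorem count_pre1 (tiles : List (Int × Int)) (j : Int) :
    ((fillA tiles 1 0 0).map Prod.fst).count j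
      = (if (2:Int) = j then nB tiles else 0) + (if (0:Int) = j then nA tiles else 0) := by
  rw [fill_pre1]; exact count_single_family tiles 2 0 j

theorem count_pre2 (tiles : List (Int × Int)) (j : Int) :
    ((fillA tiles 2 0 0).map Prod.fst).count j
      = (if (1:Int) = j then nB tiles else 0) + (if (0:Int) = j then nA tiles else 0) := by
  rw [fill_pre2]; exact count_single_family tiles 1 0 j

theorem count_pre3 (tiles : List (Int × Int)) (j : Int) :
    ((fillA tiles 3 0 0).map Prod.fst).count j = (if (0:Int) = j then 1 else 0) := by
  rw [fill_pre3]
  by_cases h : (0:Int) = j <;> simp [List.count_singleton, h] <;> simp [Ne.symm h]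

theorem count_pre0 (tiles : List (Int × Int)) (j : Int) :
    ((fillA tiles 0 0 0).map Prod.fst).count j
      = ((if (3:Int) = j then nB tiles else 0) + (if (1:Int) = j then nA tiles else 0)) * nB tiles
        + ((if (2:Int) = j then nB tiles else 0) + (if (0:Int) = j then nA tiles else 0)) * nA tiles
        + (if (3:Int) = j then 1 else 0) * nD tiles
        + (if (0:Int) = j then 1 else 0) * nC tiles := by
  rw [fill_pre0, List.map_flatMap, pvCountFlatMap]
  have hpt : ∀ x ∈ tiles, ((g0 tiles x).map Prod.fst).count j
      = (fun x : Int × Int => if x.1 = 1 then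
          (if x.2 = 2 then ((if (3:Int) = j then nB tiles else 0) + (if (1:Int) = j then nA tiles else 0))
           else ((if (2:Int) = j then nB tiles else 0) + (if (0:Int) = j then nA tiles else 0)))
        else if x.1 = 2 then (if x.2 = 2 then (if (3:Int) = j then 1 else 0) else (if (0:Int) = j then 1 else 0))
        else 0) x := by
    intro x _
    simp only [g0]
    by_cases h1 : x.1 = 1
    · rw [if_pos h1, if_pos h1, count_single_family]
      by_cases h2 : x.2 = 2 <;> simp [h2]
    · rw [if_neg h1, if_neg h1]
      by_cases h2c : x.1 = 2
      · rw [if_pos h2c, if_pos h2c]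
        by_cases h2 : x.2 = 2 <;>
          [skip; skip] <;> by_cases hj0 : (0:Int) = j <;> by_cases hj3 : (3:Int) = j <;>
          simp_all [List.count_singleton] <;> omega
      · simp [h2c]
  rw [List.map_eq_map_iff.mpr hpt, sum_percount]

theorem innerD_eq_counter (xs : List (Int × Int)) :
    xs.foldl (fun d p => d.insert p.1 (d.getD p.1 0 + 1)) PySem.Dict.empty
      = PySem.Dict.counter (xs.map Prod.fst) := by
  rw [← PySem.Dict.foldl_insert_getD_add_one_eq_counter, List.foldl_map]

theorem transA_getD (tiles : List (Int × Int)) (pre : Int)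
    (hpre : pre = 0 ∨ pre = 1 ∨ pre = 2 ∨ pre = 3) :
    (transA tiles).getD pre PySem.Dict.empty
      = PySem.Dict.counter ((fillA tiles pre 0 0).map Prod.fst) := by
  have h4 : PySem.List.pyRange 0 4 1 = [0, 1, 2, 3] := by decide
  simp only [transA, h4, List.foldl_cons, List.foldl_nil, innerD_eq_counter]
  rcases hpre with rfl | rfl | rfl | rfl <;> simp [PySem.Dict.getD_insert]

theorem inner_step (L : List (Int × Int)) (x : Int) (val : Int → Int) :
    ∀ (v : List Int), v.length = 4 → (L.map Prod.fst).Nodup →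
    (∀ p ∈ L, (0 ≤ p.1 ∧ p.1 < 4) ∧ p.2 = val p.1) →
    (L.foldl (fun ndp kv =>
        PySem.List.pySetD ndp kv.1
          (PySem.Int.mod (PySem.List.pyGetD ndp kv.1 0 + x * kv.2) pvBase)) v).length = 4 ∧
    ∀ j : Nat, j < 4 →
      (L.foldl (fun ndp kv =>
        PySem.List.pySetD ndp kv.1
          (PySem.Int.mod (PySem.List.pyGetD ndp kv.1 0 + x * kv.2) pvBase)) v).getD j 0
      = if ((j : Int)) ∈ L.map Prod.fst
        then PySem.Int.mod (v.getD j 0 + x * val ((j : Int))) pvBase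
        else v.getD j 0 := by
  induction L with
  | nil => intro v hv _ _; simp [hv]
  | cons kc t ih =>
    intro v hv hnd hmem
    obtain ⟨hk, hkval⟩ := hmem kc (by simp)
    have hrest : ∀ p ∈ t, (0 ≤ p.1 ∧ p.1 < 4) ∧ p.2 = val p.1 :=
      fun p hp => hmem p (List.mem_cons_of_mem _ hp)
    have hknat : kc.1.toNat < v.length := by omega
    have hset : PySem.List.pySetD v kc.1
        (PySem.Int.mod (PySem.List.pyGetD v kc.1 0 + x * kc.2) pvBase)
        = v.set kc.1.toNat (PySem.Int.mod (v.getD kc.1.toNat 0 + x * kc.2) pvBase) := by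
      rw [PySem.List.pySetD_of_nonneg _ _ hk.1, PySem.List.pyGetD_of_nonneg _ _ hk.1]
    simp only [List.foldl_cons, hset]
    have hnd' : (t.map Prod.fst).Nodup := (List.nodup_cons.mp hnd).2
    have hknotin : kc.1 ∉ t.map Prod.fst := (List.nodup_cons.mp hnd).1
    obtain ⟨ihlen, ihget⟩ := ih
      (v.set kc.1.toNat (PySem.Int.mod (v.getD kc.1.toNat 0 + x * kc.2) pvBase))
      (by rw [List.length_set]; exact hv) hnd' hrest
    refine ⟨ihlen, ?_⟩
    intro j hj
    rw [ihget j hj]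
    by_cases hjt : ((j : Int)) ∈ t.map Prod.fst
    · have hjk : (j : Int) ≠ kc.1 := fun h => hknotin (h ▸ hjt)
      rw [if_pos hjt, if_pos (by simp [hjt])]
      rw [List.getD_eq_getElem?_getD, List.getElem?_set_ne (by omega), ← List.getD_eq_getElem?_getD]
    · by_cases hjk : (j : Int) = kc.1
      · have hjnat : kc.1.toNat = j := by omega
        rw [if_neg hjt, if_pos (by simp [hjk])]
        rw [hjnat, List.getD_eq_getElem?_getD, List.getElem?_set_self (by omega)]
        simp [← hjk, hkval]
      · rw [if_neg hjt, if_neg (by simp [hjk, hjt])]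
        rw [List.getD_eq_getElem?_getD, List.getElem?_set_ne (by omega), ← List.getD_eq_getElem?_getD]

def firstsL (tiles : List (Int × Int)) (pre : Int) : List Int := (fillA tiles pre 0 0).map Prod.fst

theorem firsts_bound (tiles : List (Int × Int)) (pre : Int)
    (hpre : pre = 0 ∨ pre = 1 ∨ pre = 2 ∨ pre = 3) :
    ∀ v ∈ firstsL tiles pre, 0 ≤ v ∧ v < 4 := by
  intro v hv
  rcases hpre with rfl | rfl | rfl | rfl
  · rw [firstsL, fill_pre0] at hv
    simp only [g0, List.map_flatMap, List.mem_flatMap] at hv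
    obtain ⟨x, hx, hy⟩ := hv
    split_ifs at hy <;> simp [List.mem_flatMap] at hy <;>
      (try obtain ⟨b, hb, rfl⟩ := hy) <;> (try subst hy) <;> (try split_ifs) <;> omega
  · rw [firstsL, fill_pre1] at hv
    simp only [List.map_flatMap, List.mem_flatMap] at hv
    obtain ⟨x, hx, hy⟩ := hv
    split_ifs at hy <;> simp at hy <;> (try subst hy) <;> (try split_ifs) <;> omega
  · rw [firstsL, fill_pre2] at hv
    simp only [List.map_flatMap, List.mem_flatMap] at hv
    obtain ⟨x, hx, hy⟩ := hv
    split_ifs at hy <;> simp at hy <;> (try subst hy) <;> (try split_ifs) <;> omega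
  · rw [firstsL, fill_pre3] at hv
    simp at hv
    omega

abbrev Zp : Type := ZMod 1000000007

theorem pvBase_pos : (0 : Int) < pvBase := by norm_num [pvBase]

def Red (x : Int) : Prop := PySem.Int.mod x pvBase = x

theorem castmod (a : Int) : ((PySem.Int.mod a pvBase : Int) : Zp) = (a : Zp) := by
  rw [PySem.Int.mod_eq_emod_of_pos pvBase_pos]
  refine (ZMod.intCast_eq_intCast_iff _ _ _).mpr ?_
  show _ % _ = _ % _
  rw [show ((1000000007 : Nat) : Int) = pvBase from by norm_num [pvBase]]
  exact Int.emod_emod_of_dvd a dvd_rfl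

theorem red_mod (a : Int) : Red (PySem.Int.mod a pvBase) := by
  unfold Red
  rw [PySem.Int.mod_eq_emod_of_pos pvBase_pos, PySem.Int.mod_eq_emod_of_pos pvBase_pos]
  exact Int.emod_emod_of_dvd a dvd_rfl

theorem red_zero : Red 0 := by unfold Red pvBase; decide
theorem red_one : Red 1 := by unfold Red pvBase; decide

theorem red_int_eq {x y : Int} (hx : Red x) (hy : Red y) (h : (x : Zp) = (y : Zp)) : x = y := by
  have h1 : x % pvBase = y % pvBase := by
    have h2 := (ZMod.intCast_eq_intCast_iff x y 1000000007).mp h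
    have h3 : x % ((1000000007 : Nat) : Int) = y % ((1000000007 : Nat) : Int) := h2
    rwa [show ((1000000007 : Nat) : Int) = pvBase from by norm_num [pvBase]] at h3
  have hx' := hx; have hy' := hy
  unfold Red at hx' hy'
  rw [PySem.Int.mod_eq_emod_of_pos pvBase_pos] at hx' hy'
  omega

theorem per_pre (tiles : List (Int × Int)) (dp ndp : List Int) (pre : Int)
    (hpre : pre = 0 ∨ pre = 1 ∨ pre = 2 ∨ pre = 3) (hnd : ndp.length = 4) (r : List Int)
    (hr : r = (if PySem.List.pyGetD dp pre 0 = 0 then ndp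
      else (((transA tiles).getD pre PySem.Dict.empty).items).foldl
        (fun ndp kv => PySem.List.pySetD ndp kv.1
          (PySem.Int.mod (PySem.List.pyGetD ndp kv.1 0 + PySem.List.pyGetD dp pre 0 * kv.2) pvBase))
        ndp)) :
    r.length = 4 ∧ ∀ j : Nat, j < 4 →
      (Red (ndp.getD j 0) → Red (r.getD j 0)) ∧
      ((r.getD j 0 : Zp)
        = (ndp.getD j 0 : Zp)
          + ((PySem.List.pyGetD dp pre 0 : Int) : Zp)
            * (((firstsL tiles pre).count ((j : Nat) : Int) : Nat) : Zp)) := by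
  by_cases h0 : PySem.List.pyGetD dp pre 0 = 0
  · rw [if_pos h0] at hr
    subst hr
    exact ⟨hnd, fun j hj => ⟨id, by rw [h0]; push_cast; ring⟩⟩
  · rw [if_neg h0] at hr
    rw [transA_getD tiles pre hpre,
      show (fillA tiles pre 0 0).map Prod.fst = firstsL tiles pre from rfl] at hr
    have hknd : ((PySem.Dict.counter (firstsL tiles pre)).items.map Prod.fst).Nodup := by
      have h := PySem.Dict.nodup_keys_counter (firstsL tiles pre)
      simpa [PySem.Dict.keys] using h
    have hmem : ∀ p ∈ (PySem.Dict.counter (firstsL tiles pre)).items,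
        (0 ≤ p.1 ∧ p.1 < 4) ∧ p.2 = (((firstsL tiles pre).count p.1 : Nat) : Int) := by
      intro p hp
      have hk : p.1 ∈ (PySem.Dict.counter (firstsL tiles pre)).keys :=
        PySem.Dict.mem_keys_of_mem_items _ hp
      have hk' : p.1 ∈ firstsL tiles pre := by
        rw [PySem.Dict.keys_counter] at hk
        exact (PySem.Set.mem_ofList _ _).mp hk
      refine ⟨firsts_bound tiles pre hpre p.1 hk', ?_⟩
      have h1 : (PySem.Dict.counter (firstsL tiles pre)).getD p.1 0 = p.2 := by
        obtain ⟨k, v⟩ := p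
        exact PySem.Dict.getD_of_mem_items _ hp (PySem.Dict.nodup_keys_counter _) 0
      rw [← h1, PySem.Dict.getD_counter]
    obtain ⟨hlen, hget⟩ := inner_step
      ((PySem.Dict.counter (firstsL tiles pre)).items)
      (PySem.List.pyGetD dp pre 0)
      (fun k => (((firstsL tiles pre).count k : Nat) : Int))
      ndp hnd hknd (fun p hp => (hmem p hp))
    subst hr
    refine ⟨hlen, ?_⟩
    intro j hj
    rw [hget j hj]
    by_cases hin : ((j : Nat) : Int) ∈ (PySem.Dict.counter (firstsL tiles pre)).items.map Prod.fst
    · rw [if_pos hin]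
      refine ⟨fun _ => red_mod _, ?_⟩
      rw [castmod]; push_cast; ring
    · rw [if_neg hin]
      have hnotin : ((j : Nat) : Int) ∉ firstsL tiles pre := by
        intro hmem'
        apply hin
        have : ((j : Nat) : Int) ∈ (PySem.Dict.counter (firstsL tiles pre)).keys := by
          rw [PySem.Dict.keys_counter]
          exact (PySem.Set.mem_ofList _ _).mpr hmem'
        simpa [PySem.Dict.keys] using this
      have hc : (firstsL tiles pre).count ((j : Nat) : Int) = 0 := List.count_eq_zero.mpr hnotin
      refine ⟨id, ?_⟩
      rw [hc]
      push_cast; ring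

def Mzm (tiles : List (Int × Int)) : Matrix (Fin 4) (Fin 4) Zp :=
  !![(nA tiles : Zp) * nA tiles + nC tiles, (nB tiles : Zp) * nA tiles,
       (nA tiles : Zp) * nB tiles, (nB tiles : Zp) * nB tiles + nD tiles;
     (nA tiles : Zp), 0, (nB tiles : Zp), 0;
     (nA tiles : Zp), (nB tiles : Zp), 0, 0;
     1, 0, 0, 0]

theorem cnt_eq_Mzm (tiles : List (Int × Int)) (pre j : Fin 4) :
    (((firstsL tiles ((pre : Nat) : Int)).count ((j : Nat) : Int) : Nat) : Zp)
      = Mzm tiles pre j := by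
  fin_cases pre <;> fin_cases j <;>
    simp [firstsL, count_pre0, count_pre1, count_pre2, count_pre3, Mzm] <;>
    push_cast <;> ring

theorem pyRange04 : PySem.List.pyRange 0 4 1 = [0, 1, 2, 3] := by decide

def stepA (tiles : List (Int × Int)) (dp : List Int) : List Int :=
  (PySem.List.pyRange 0 4 1).foldl (fun ndp pre =>
    if PySem.List.pyGetD dp pre 0 = 0 then ndp
    else (((transA tiles).getD pre PySem.Dict.empty).items).foldl
      (fun ndp kv => PySem.List.pySetD ndp kv.1
        (PySem.Int.mod (PySem.List.pyGetD ndp kv.1 0 + PySem.List.pyGetD dp pre 0 * kv.2) pvBase))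
      ndp)
    (List.replicate 4 (0 : Int))

theorem cnt0 (tiles : List (Int × Int)) (j : Fin 4) :
    (((firstsL tiles 0).count ((j : Nat) : Int) : Nat) : Zp) = Mzm tiles 0 j := by
  simpa using cnt_eq_Mzm tiles 0 j
theorem cnt1 (tiles : List (Int × Int)) (j : Fin 4) :
    (((firstsL tiles 1).count ((j : Nat) : Int) : Nat) : Zp) = Mzm tiles 1 j := by
  simpa using cnt_eq_Mzm tiles 1 j
theorem cnt2 (tiles : List (Int × Int)) (j : Fin 4) :
    (((firstsL tiles 2).count ((j : Nat) : Int) : Nat) : Zp) = Mzm tiles 2 j := by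
  simpa using cnt_eq_Mzm tiles 2 j
theorem cnt3 (tiles : List (Int × Int)) (j : Fin 4) :
    (((firstsL tiles 3).count ((j : Nat) : Int) : Nat) : Zp) = Mzm tiles 3 j := by
  simpa using cnt_eq_Mzm tiles 3 j

theorem rep0 (j : Nat) : (List.replicate 4 (0 : Int)).getD j 0 = 0 := by
  rcases Nat.lt_or_ge j 4 with h | h
  · rw [List.getD_eq_getElem?_getD, List.getElem?_replicate]
    simp [h]
  · rw [List.getD_eq_getElem?_getD, List.getElem?_eq_none (by simpa using h)]
    rfl

theorem stepA_inv (tiles : List (Int × Int)) (dp : List Int) (m : Nat)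
    (h2 : ∀ j, j < 4 → Red (dp.getD j 0))
    (h3 : ∀ j : Fin 4, ((dp.getD (j : Nat) 0 : Int) : Zp) = (Mzm tiles ^ m) 0 j) :
    (stepA tiles dp).length = 4 ∧ (∀ j, j < 4 → Red ((stepA tiles dp).getD j 0))
      ∧ (∀ j : Fin 4, (((stepA tiles dp).getD (j : Nat) 0 : Int) : Zp) = (Mzm tiles ^ (m + 1)) 0 j) := by
  unfold stepA
  rw [pyRange04]
  simp only [List.foldl_cons, List.foldl_nil]
  obtain ⟨l0, p0⟩ := per_pre tiles dp (List.replicate 4 0) 0 (by tauto) (by simp) _ rfl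
  obtain ⟨l1, p1⟩ := per_pre tiles dp _ 1 (by tauto) l0 _ rfl
  obtain ⟨l2, p2⟩ := per_pre tiles dp _ 2 (by tauto) l1 _ rfl
  obtain ⟨l3, p3⟩ := per_pre tiles dp _ 3 (by tauto) l2 _ rfl
  refine ⟨l3, ?_, ?_⟩
  · intro j hj
    exact ((p3 j hj).1 ((p2 j hj).1 ((p1 j hj).1 ((p0 j hj).1 (by rw [rep0]; exact red_zero)))))
  · intro j
    have hj : (j : Nat) < 4 := j.isLt
    have hd : ∀ p : Fin 4, PySem.List.pyGetD dp ((p : Nat) : Int) 0 = dp.getD (p : Nat) 0 := by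
      intro p; rw [PySem.List.pyGetD_natCast]
    rw [(p3 (j : Nat) hj).2, (p2 (j : Nat) hj).2, (p1 (j : Nat) hj).2, (p0 (j : Nat) hj).2]
    have hrep : (((List.replicate 4 (0 : Int)).getD (j : Nat) 0 : Int) : Zp) = 0 := by
      rw [rep0]; rfl
    rw [hrep, cnt0 tiles j, cnt1 tiles j, cnt2 tiles j, cnt3 tiles j]
    have e0 := hd 0; have e1 := hd 1; have e2 := hd 2; have e3 := hd 3
    simp only [Fin.val_zero, Fin.val_one, Nat.cast_zero, Nat.cast_one, Nat.cast_ofNat] at e0 e1 e2 e3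
    rw [show PySem.List.pyGetD dp 0 0 = dp.getD 0 0 from e0,
        show PySem.List.pyGetD dp 1 0 = dp.getD 1 0 from e1,
        show PySem.List.pyGetD dp 2 0 = dp.getD 2 0 from e2,
        show PySem.List.pyGetD dp 3 0 = dp.getD 3 0 from e3]
    have q0 := h3 0; have q1 := h3 1; have q2 := h3 2; have q3 := h3 3
    simp only [Fin.val_zero, Fin.val_one, Fin.isValue,
      show ((2 : Fin 4) : Nat) = 2 from rfl, show ((3 : Fin 4) : Nat) = 3 from rfl] at q0 q1 q2 q3
    rw [q0, q1, q2, q3]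
    rw [pow_succ, Matrix.mul_apply, Fin.sum_univ_four]
    ring

theorem foldl_constf {α β : Type} (l : List α) (f : β → β) (init : β) :
    l.foldl (fun acc _ => f acc) init = f^[l.length] init := by
  induction l generalizing init with
  | nil => rfl
  | cons x t ih => simp [ih, Function.iterate_succ_apply]

theorem A_inv (tiles : List (Int × Int)) (m : Nat) :
    ((stepA tiles)^[m] [1, 0, 0, 0]).length = 4
      ∧ (∀ j, j < 4 → Red (((stepA tiles)^[m] [1, 0, 0, 0]).getD j 0))
      ∧ (∀ j : Fin 4, ((((stepA tiles)^[m] [1, 0, 0, 0]).getD (j : Nat) 0 : Int) : Zp)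
          = (Mzm tiles ^ m) 0 j) := by
  induction m with
  | zero =>
    refine ⟨rfl, ?_, ?_⟩
    · intro j hj
      interval_cases j <;> simp [List.getD] <;> first | exact red_one | exact red_zero
    · intro j
      fin_cases j <;> simp [List.getD, Matrix.one_apply]
  | succ m ih =>
    rw [Function.iterate_succ_apply']
    exact stepA_inv tiles _ m ih.2.1 ih.2.2

theorem countsB (tiles : List (Int × Int)) :
    ∀ acc : Int × Int × Int × Int,
      tiles.foldl (fun (c : Int × Int × Int × Int) hw =>
        if hw.1 = 1 then
          (if hw.2 = 2 then (c.1, c.2.1 + 1, c.2.2.1, c.2.2.2) else (c.1 + 1, c.2.1, c.2.2.1, c.2.2.2))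
        else if hw.1 = 2 then
          (if hw.2 = 2 then (c.1, c.2.1, c.2.2.1, c.2.2.2 + 1) else (c.1, c.2.1, c.2.2.1 + 1, c.2.2.2))
        else c) acc
      = (acc.1 + (nA tiles : Int), acc.2.1 + (nB tiles : Int),
         acc.2.2.1 + (nC tiles : Int), acc.2.2.2 + (nD tiles : Int)) := by
  induction tiles with
  | nil => intro acc; simp [nA, nB, nC, nD]
  | cons x t ih =>
    intro acc
    simp only [List.foldl_cons, ih, nA, nB, nC, nD, List.countP_cons]
    clear ih
    split_ifs <;>
      first
        | (refine Prod.ext ?_ (Prod.ext ?_ (Prod.ext ?_ ?_)) <;> simp <;> push_cast <;> omega)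
        | (exfalso; simp_all)

def phiM (X : List (List Int)) : Matrix (Fin 4) (Fin 4) Zp :=
  Matrix.of fun i j => (((X.getD (i : Nat) []).getD (j : Nat) 0 : Int) : Zp)

set_option maxHeartbeats 1000000 in
theorem phi_mul (X Y : List (List Int)) : phiM (pvMatMulB X Y) = phiM X * phiM Y := by
  ext i j
  rw [Matrix.mul_apply, Fin.sum_univ_four]
  fin_cases i <;> fin_cases j <;>
    (simp only [phiM, pvMatMulB, pyRange04, List.map_cons, List.map_nil, Matrix.of_apply,
      PySem.List.pyGetD_ofNat', List.getD_cons_zero, List.getD_cons_succ, List.sum_cons,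
      List.sum_nil, Fin.isValue, Fin.val_zero, Fin.val_one,
      show ((2 : Fin 4) : Nat) = 2 from rfl, show ((3 : Fin 4) : Nat) = 3 from rfl] <;>
     rw [castmod] <;> push_cast <;> ring)

theorem phi_idB : phiM ((PySem.List.pyRange 0 4 1).map (fun i =>
    (PySem.List.pyRange 0 4 1).map (fun j => if i = j then (1 : Int) else 0))) = 1 := by
  ext i j
  fin_cases i <;> fin_cases j <;>
    simp [phiM, pyRange04, Matrix.one_apply, List.getD]

theorem red_mulB (X Y : List (List Int)) (i j : Nat) (hi : i < 4) (hj : j < 4) :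
    Red (((pvMatMulB X Y).getD i []).getD j 0) := by
  interval_cases i <;> interval_cases j <;>
    (simp only [pvMatMulB, pyRange04, List.map_cons, List.map_nil,
      List.getD_cons_zero, List.getD_cons_succ] <;> exact red_mod _)

theorem pow_phi (e : Nat) : ∀ R M : List (List Int),
    phiM (pvPowLoop R M e) = phiM R * (phiM M) ^ e := by
  induction e using Nat.strong_induction_on with
  | _ e ih =>
    intro R M
    rw [pvPowLoop]
    by_cases he : e = 0
    · simp [he]
    · rw [dif_neg he, ih (e / 2) (Nat.div_lt_self (Nat.pos_of_ne_zero he) one_lt_two), phi_mul]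
      by_cases hp : e % 2 = 1
      · rw [if_pos hp, phi_mul,
          show phiM M * phiM M = phiM M ^ 2 from (sq (phiM M)).symm, ← pow_mul,
          mul_assoc, ← pow_succ', show 2 * (e / 2) + 1 = e from by omega]
      · rw [if_neg hp,
          show phiM M * phiM M = phiM M ^ 2 from (sq (phiM M)).symm, ← pow_mul,
          show 2 * (e / 2) = e from by omega]

theorem pow_red (e : Nat) : ∀ R M : List (List Int), e ≠ 0 → ∀ i j : Nat, i < 4 → j < 4 →
    Red (((pvPowLoop R M e).getD i []).getD j 0) := by
  induction e using Nat.strong_induction_on with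
  | _ e ih =>
    intro R M he i j hi hj
    rw [pvPowLoop, dif_neg he]
    by_cases h2 : e / 2 = 0
    · rw [h2, pvPowLoop, dif_pos rfl, if_pos (by omega)]
      exact red_mulB R M i j hi hj
    · exact ih (e / 2) (Nat.div_lt_self (Nat.pos_of_ne_zero he) one_lt_two) _ _ h2 i j hi hj

theorem profile_eq (n : Int) (tiles : List (Int × Int)) :
    profile_dp_2row n tiles
      = PySem.List.pyGetD ((stepA tiles)^[n.toNat] [1, 0, 0, 0]) 0 0 := by
  show PySem.List.pyGetD
      ((PySem.List.pyRange 0 n 1).foldl (fun dp _ => stepA tiles dp)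
        ((List.replicate 4 (0 : Int)).set 0 1)) 0 0 = _
  rw [foldl_constf, PySem.List.length_pyRange_one]
  norm_num
  rfl

set_option maxHeartbeats 1000000 in
theorem MB_phi (tiles : List (Int × Int)) :
    phiM
      [[PySem.Int.mod ((nA tiles : Int) * nA tiles + nC tiles) pvBase,
        PySem.Int.mod ((nB tiles : Int) * nA tiles) pvBase,
        PySem.Int.mod ((nA tiles : Int) * nB tiles) pvBase,
        PySem.Int.mod ((nB tiles : Int) * nB tiles + nD tiles) pvBase],
       [PySem.Int.mod (nA tiles : Int) pvBase, 0, PySem.Int.mod (nB tiles : Int) pvBase, 0],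
       [PySem.Int.mod (nA tiles : Int) pvBase, PySem.Int.mod (nB tiles : Int) pvBase, 0, 0],
       [1, 0, 0, 0]] = Mzm tiles := by
  ext i j
  fin_cases i <;> fin_cases j <;>
    (simp only [phiM, Mzm, Matrix.of_apply, List.getD_cons_zero, List.getD_cons_succ,
        Fin.isValue, Fin.val_zero, Fin.val_one,
        show ((2 : Fin 4) : Nat) = 2 from rfl, show ((3 : Fin 4) : Nat) = 3 from rfl] <;>
     simp only [Matrix.cons_val', Matrix.cons_val_zero, Matrix.cons_val_one, Matrix.head_cons,
        Matrix.empty_val', Matrix.cons_val_fin_one, Matrix.head_fin_const] <;>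
     (try rw [castmod]) <;> push_cast <;> (first | ring | norm_num))

def MBl (tiles : List (Int × Int)) : List (List Int) :=
  [[PySem.Int.mod ((nA tiles : Int) * nA tiles + nC tiles) pvBase,
    PySem.Int.mod ((nB tiles : Int) * nA tiles) pvBase,
    PySem.Int.mod ((nA tiles : Int) * nB tiles) pvBase,
    PySem.Int.mod ((nB tiles : Int) * nB tiles + nD tiles) pvBase],
   [PySem.Int.mod (nA tiles : Int) pvBase, 0, PySem.Int.mod (nB tiles : Int) pvBase, 0],
   [PySem.Int.mod (nA tiles : Int) pvBase, PySem.Int.mod (nB tiles : Int) pvBase, 0, 0],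
   [1, 0, 0, 0]]

def R0l : List (List Int) :=
  (PySem.List.pyRange 0 4 1).map (fun i =>
    (PySem.List.pyRange 0 4 1).map (fun j => if i = j then (1 : Int) else 0))

theorem alt_eq (n : Int) (tiles : List (Int × Int)) :
    profile_dp_2row_alt n tiles
      = ((pvPowLoop R0l (MBl tiles) (if n > 0 then n else 0).toNat).getD 0 []).getD 0 0 := by
  simp only [profile_dp_2row_alt]
  rw [countsB tiles (0, 0, 0, 0)]
  norm_num [MBl, R0l, PySem.List.pyGetD_ofNat']

theorem AB_eq (n : Int) (tiles : List (Int × Int)) :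
    profile_dp_2row n tiles = profile_dp_2row_alt n tiles := by
  rw [profile_eq, alt_eq]
  by_cases hn : n > 0
  · obtain ⟨hlen, hred, hcast⟩ := A_inv tiles n.toNat
    rw [PySem.List.pyGetD_ofNat', if_pos hn]
    have he : n.toNat ≠ 0 := by omega
    refine red_int_eq (hred 0 (by omega)) (pow_red n.toNat R0l (MBl tiles) he 0 0 (by omega) (by omega)) ?_
    have hA := hcast 0
    simp only [Fin.val_zero] at hA
    rw [hA]
    have hB : (((((pvPowLoop R0l (MBl tiles) n.toNat).getD 0 []).getD 0 0 : Int)) : Zp)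
        = (phiM (pvPowLoop R0l (MBl tiles) n.toNat)) 0 0 := by
      simp [phiM]
    rw [hB, pow_phi, show phiM R0l = 1 from phi_idB, show phiM (MBl tiles) = Mzm tiles from MB_phi tiles, one_mul]
  · rw [if_neg hn, show n.toNat = 0 from by omega]
    rw [Function.iterate_zero_apply]
    show (1 : Int) = _
    rw [show (0 : Int).toNat = 0 from rfl, pvPowLoop, dif_pos rfl]
    decide

-- ===== VERDICT (by name: the statement is the Claim_ definition above) =====
theorem profile_dp_2row_spec : Claim_equal_profile_dp_2row := by
  intro n tiles _
  exact AB_eq n tiles
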